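-- pv_equiv track=rewrite | github.com/yashawanthbg2001/knownow | automate.py | categorize_phrase
-- ===== SOURCE A (Python) =====
-- def categorize_phrase(phrase):
--     """
--     Determines the product category based on keywords in the phrase.
--     Returns the matching category or None if no match is found.
--     """
--     phrase_lower = phrase.lower()
--     if any(
--         x in phrase_lower for x in ["smartphone", "phone", "galaxy", "iphone", "pixel"]
--     ):
--         return "Smartphones"
--     elif any(x in phrase_lower for x in ["laptop", "notebook", "macbook"]):
--         return "Laptops"
--     elif any(
--         x in phrase_lower
--         for x in ["headphones", "earbuds", "earphones", "audio", "speakers"]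
--     ):
--         return "Audio"
--     elif any(
--         x in phrase_lower
--         for x in ["smart home", "thermostat", "light", "bulb", "switch", "plug", "hub"]
--     ):
--         return "Smart Home Devices"
--     elif any(
--         x in phrase_lower
--         for x in ["wearables", "watch", "smartwatch", "fitness", "tracker", "band"]
--     ):
--         return "Wearables"
--     return None
-- ===== SOURCE B (Python) =====
-- _CATEGORY_NAMES = ["Smartphones", "Laptops", "Audio", "Smart Home Devices", "Wearables"]
--
-- _KEYWORD_RANK = {}
-- for _i, _kws in enumerate([
--     ["smartphone", "phone", "galaxy", "iphone", "pixel"],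
--     ["laptop", "notebook", "macbook"],
--     ["headphones", "earbuds", "earphones", "audio", "speakers"],
--     ["smart home", "thermostat", "light", "bulb", "switch", "plug", "hub"],
--     ["wearables", "watch", "smartwatch", "fitness", "tracker", "band"],
-- ]):
--     for _kw in _kws:
--         _KEYWORD_RANK[_kw] = _i
--
-- def categorize_phrase(phrase):
--     phrase_lower = phrase.lower()
--     best = min((rank for kw, rank in _KEYWORD_RANK.items() if kw in phrase_lower),
--                default=None)
--     return None if best is None else _CATEGORY_NAMES[best]
-- ===== Notes on version B (the rewrite author's own statement) =====
-- stated objective: alternative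
-- what changed: Instead of an early-return per-category if/elif ladder, B flattens all keywords into one keyword->priority-rank map, takes the minimum rank among ALL matching keywords in a single pass, and indexes a name table; correct because the first category in priority order with a match is exactly the category of minimal rank among matches.
import Mathlib
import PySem

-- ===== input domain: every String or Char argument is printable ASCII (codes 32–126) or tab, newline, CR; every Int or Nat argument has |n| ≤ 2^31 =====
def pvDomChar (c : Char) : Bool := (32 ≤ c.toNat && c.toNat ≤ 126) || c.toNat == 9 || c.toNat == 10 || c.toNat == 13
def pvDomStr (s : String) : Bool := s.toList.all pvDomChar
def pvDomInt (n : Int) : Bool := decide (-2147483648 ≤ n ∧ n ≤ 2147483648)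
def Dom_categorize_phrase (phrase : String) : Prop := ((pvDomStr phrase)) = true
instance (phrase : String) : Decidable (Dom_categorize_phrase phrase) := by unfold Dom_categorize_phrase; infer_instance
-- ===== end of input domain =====

-- B replaces A's early-return if/elif ladder by a minimum-rank computation over a flat
-- keyword -> priority-rank map plus a name table; same result, alternative algorithm.

-- ===== PORT A =====
def categorize_phrase (phrase : String) : Option String :=
  let phrase_lower := PySem.Str.lower phrase
  if ["smartphone", "phone", "galaxy", "iphone", "pixel"].any
      (fun x => PySem.Str.isIn x phrase_lower) then
    some "Smartphones"
  else if ["laptop", "notebook", "macbook"].any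
      (fun x => PySem.Str.isIn x phrase_lower) then
    some "Laptops"
  else if ["headphones", "earbuds", "earphones", "audio", "speakers"].any
      (fun x => PySem.Str.isIn x phrase_lower) then
    some "Audio"
  else if ["smart home", "thermostat", "light", "bulb", "switch", "plug", "hub"].any
      (fun x => PySem.Str.isIn x phrase_lower) then
    some "Smart Home Devices"
  else if ["wearables", "watch", "smartwatch", "fitness", "tracker", "band"].any
      (fun x => PySem.Str.isIn x phrase_lower) then
    some "Wearables"
  else
    none

-- ===== PORT B =====
def pvNames : List String :=
  ["Smartphones", "Laptops", "Audio", "Smart Home Devices", "Wearables"]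

-- the flat keyword -> rank map _KEYWORD_RANK of Source B (insertion order; keys are distinct)
def pvKeywordRank : List (String × Nat) :=
  (["smartphone", "phone", "galaxy", "iphone", "pixel"].map (fun k => (k, 0))) ++
  (["laptop", "notebook", "macbook"].map (fun k => (k, 1))) ++
  (["headphones", "earbuds", "earphones", "audio", "speakers"].map (fun k => (k, 2))) ++
  (["smart home", "thermostat", "light", "bulb", "switch", "plug", "hub"].map (fun k => (k, 3))) ++
  (["wearables", "watch", "smartwatch", "fitness", "tracker", "band"].map (fun k => (k, 4)))

-- one step of Python's min(..., default=None) accumulation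
def pvMerge (acc : Option Nat) (r : Nat) : Option Nat :=
  match acc with
  | none => some r
  | some b => some (min b r)

def categorize_phrase_alt (phrase : String) : Option String :=
  let phrase_lower := PySem.Str.lower phrase
  let best := pvKeywordRank.foldl
    (fun acc kr => if PySem.Str.isIn kr.1 phrase_lower then pvMerge acc kr.2 else acc) none
  match best with
  | none => none
  | some i => PySem.List.pyGet? pvNames (i : Int)

-- ===== PRECONDITION & SPEC =====
def Spec_categorize_phrase (phrase : String) (out : Option String) : Prop := out = categorize_phrase_alt phrase
instance (phrase : String) (out : Option String) : Decidable (Spec_categorize_phrase phrase out) := by unfold Spec_categorize_phrase; infer_instance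

-- ===== CLAIM (what is proved, stated in full; the proofs are below) =====
def Claim_equal_categorize_phrase : Prop := ∀ (phrase : String), Dom_categorize_phrase phrase → Spec_categorize_phrase phrase (categorize_phrase phrase)

-- ===== LEMMAS AND PROOFS =====

lemma pvMerge_idem (acc : Option Nat) (r : Nat) : pvMerge (pvMerge acc r) r = pvMerge acc r := by
  cases acc <;> simp [pvMerge]

-- folding B's min-step over one category's keywords (all with the same rank r)
lemma pv_run (pl : String) (r : Nat) (ks : List String) (acc : Option Nat) :
    (ks.map (fun k => (k, r))).foldl
      (fun acc kr => if PySem.Str.isIn kr.1 pl then pvMerge acc kr.2 else acc) acc =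
    if ks.any (fun x => PySem.Str.isIn x pl) then pvMerge acc r else acc := by
  induction ks generalizing acc with
  | nil => simp
  | cons k ks ih =>
    simp only [List.map, List.foldl, List.any_cons]
    rcases Bool.eq_false_or_eq_true (PySem.Str.isIn k pl) with h | h
    · simp only [h, ih]; simp [pvMerge_idem]
    · simp only [h, ih]; simp

-- ===== VERDICT (by name: the statement is the Claim_ definition above) =====
theorem categorize_phrase_spec : Claim_equal_categorize_phrase := by
  intro phrase _
  unfold Spec_categorize_phrase categorize_phrase categorize_phrase_alt pvKeywordRank
  simp only [List.foldl_append, pv_run]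
  set pl := PySem.Str.lower phrase
  cases h0 : ["smartphone", "phone", "galaxy", "iphone", "pixel"].any (fun x => PySem.Str.isIn x pl) <;>
  cases h1 : ["laptop", "notebook", "macbook"].any (fun x => PySem.Str.isIn x pl) <;>
  cases h2 : ["headphones", "earbuds", "earphones", "audio", "speakers"].any (fun x => PySem.Str.isIn x pl) <;>
  cases h3 : ["smart home", "thermostat", "light", "bulb", "switch", "plug", "hub"].any (fun x => PySem.Str.isIn x pl) <;>
  cases h4 : ["wearables", "watch", "smartwatch", "fitness", "tracker", "band"].any (fun x => PySem.Str.isIn x pl) <;>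
  simp [pvMerge] <;> rfl
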